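-- pv_equiv track=rewrite | github.com/cgpropz/PP_Research_Tool | generate_players.py | prioritize_prop
-- ===== SOURCE A (Python) =====
-- def prioritize_prop(records_for_player):
--     # Prefer a good default stat for initial render
--     order = ['Pts+Rebs+Asts','Points','Assists','Rebounds','Threes','Turnovers','Steals + Blocks','Fantasy Score','Steals','Blocks']
--     # Normalize PRA alias during comparison
--     def norm_prop(p):
--         return 'Pts+Rebs+Asts' if p == 'PRA' else p
--     for pref in order:
--         m = next((r for r in records_for_player if norm_prop(str(r.get('prop'))) == pref), None)
--         if m:
--             return m
--     return records_for_player[0] if records_for_player else None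
-- ===== SOURCE B (Python) =====
-- def prioritize_prop(records_for_player):
--     # One pass: index the first truthy record per normalized prop, then walk the preference order.
--     order = ['Pts+Rebs+Asts','Points','Assists','Rebounds','Threes','Turnovers','Steals + Blocks','Fantasy Score','Steals','Blocks']
--     index = {}
--     for r in records_for_player:
--         if r:
--             k = str(r.get('prop'))
--             if k == 'PRA':
--                 k = 'Pts+Rebs+Asts'
--             if k not in index:
--                 index[k] = r
--     for pref in order:
--         if pref in index:
--             return index[pref]
--     return records_for_player[0] if records_for_player else None
-- ===== Notes on version B (the rewrite author's own statement) =====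
-- stated objective: alternative
-- what changed: B replaces A's per-preference linear scans (one next(...) per preference) with a single indexing pass that maps each normalized prop to its first truthy record, followed by a walk over the fixed preference order.
import Mathlib
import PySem

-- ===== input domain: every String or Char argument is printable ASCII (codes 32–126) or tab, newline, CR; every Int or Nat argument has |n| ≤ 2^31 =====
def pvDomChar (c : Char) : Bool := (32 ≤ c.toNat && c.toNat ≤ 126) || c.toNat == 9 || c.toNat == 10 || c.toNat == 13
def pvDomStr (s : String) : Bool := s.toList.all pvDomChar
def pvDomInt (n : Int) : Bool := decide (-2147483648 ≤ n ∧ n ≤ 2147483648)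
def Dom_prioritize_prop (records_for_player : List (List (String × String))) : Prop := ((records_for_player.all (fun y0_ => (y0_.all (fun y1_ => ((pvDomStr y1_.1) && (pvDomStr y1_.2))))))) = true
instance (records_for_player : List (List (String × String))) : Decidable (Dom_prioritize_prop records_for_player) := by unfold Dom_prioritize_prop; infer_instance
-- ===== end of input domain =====

-- B replaces A's per-preference linear scans with one indexing pass over the records plus a walk
-- over the fixed preference order (objective: alternative single-pass structure).


-- ===== PORT A =====
-- str(r.get('prop')): first-match lookup in the record (a Python dict), str(None) = "None"
def pvStrGetA (r : List (String × String)) : String :=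
  match r.find? (fun p => p.1 == "prop") with
  | some p => p.2
  | none => "None"

def pvNormA (p : String) : String := if p == "PRA" then "Pts+Rebs+Asts" else p

def pvOrderA : List String :=
  ["Pts+Rebs+Asts","Points","Assists","Rebounds","Threes","Turnovers","Steals + Blocks","Fantasy Score","Steals","Blocks"]

-- the 'for pref in order' loop; next((... ), None) is List.find?; 'if m:' is the truthiness test
def pvALoop (rs : List (List (String × String))) : List String → Option (List (String × String))
  | [] => match rs with | [] => none | r :: _ => some r
  | pref :: rest =>
    match rs.find? (fun r => pvNormA (pvStrGetA r) == pref) with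
    | some m => if m.isEmpty then pvALoop rs rest else some m
    | none => pvALoop rs rest

def prioritize_prop (records_for_player : List (List (String × String))) : Option (List (String × String)) :=
  pvALoop records_for_player pvOrderA

-- ===== PORT B =====
def pvKeyB (r : List (String × String)) : String :=
  let k := pvStrGetA r
  if k == "PRA" then "Pts+Rebs+Asts" else k

-- the indexing pass: first truthy record per normalized prop ('if k not in index: index[k] = r')
def pvIndexB (rs : List (List (String × String))) : PySem.Dict String (List (String × String)) :=
  rs.foldl
    (fun d r =>
      if r.isEmpty then d
      else if d.contains (pvKeyB r) then d else d.insert (pvKeyB r) r)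
    PySem.Dict.empty

-- 'for pref in order: if pref in index: return index[pref]'
def pvBLoop (idx : PySem.Dict String (List (String × String))) : List String → Option (List (String × String))
  | [] => none
  | pref :: rest =>
    match idx.get? pref with
    | some v => some v
    | none => pvBLoop idx rest

def prioritize_prop_alt (records_for_player : List (List (String × String))) : Option (List (String × String)) :=
  match pvBLoop (pvIndexB records_for_player) pvOrderA with
  | some v => some v
  | none => match records_for_player with | [] => none | r :: _ => some r

-- ===== PRECONDITION & SPEC =====
def Spec_prioritize_prop (records_for_player : List (List (String × String))) (out : Option (List (String × String))) : Prop := out = prioritize_prop_alt records_for_player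
instance (records_for_player : List (List (String × String))) (out : Option (List (String × String))) : Decidable (Spec_prioritize_prop records_for_player out) := by unfold Spec_prioritize_prop; infer_instance

-- ===== CLAIM (what is proved, stated in full; the proofs are below) =====
def Claim_equal_prioritize_prop : Prop := ∀ (records_for_player : List (List (String × String))), Dom_prioritize_prop records_for_player → Spec_prioritize_prop records_for_player (prioritize_prop records_for_player)

-- ===== LEMMAS AND PROOFS =====

-- the two record-key helpers are the same function
theorem pvKey_eq (r : List (String × String)) : pvKeyB r = pvNormA (pvStrGetA r) := by
  simp [pvKeyB, pvNormA]

-- index characterization: looking up pref in the index built from rs on top of d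
theorem pvIndex_get (rs : List (List (String × String)))
    (d : PySem.Dict String (List (String × String))) (pref : String) :
    (rs.foldl
      (fun d r =>
        if r.isEmpty then d
        else if d.contains (pvKeyB r) then d else d.insert (pvKeyB r) r)
      d).get? pref
    = match d.get? pref with
      | some v => some v
      | none => rs.find? (fun r => !r.isEmpty && pvKeyB r == pref) := by
  induction rs generalizing d with
  | nil => cases h : d.get? pref <;> simp [h]
  | cons r rest ih =>
    by_cases hr : r.isEmpty
    · rw [List.foldl_cons, if_pos hr, ih d]
      cases d.get? pref with
      | none => simp [hr]
      | some v => rfl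
    · rw [List.foldl_cons, if_neg hr]
      by_cases hc : d.contains (pvKeyB r)
      · rw [if_pos hc, ih d]
        cases h : d.get? pref with
        | some v => rfl
        | none =>
          have hne : pvKeyB r ≠ pref := by
            intro he
            rw [he] at hc
            rw [PySem.Dict.contains_eq_isSome_get?, h] at hc
            simp at hc
          simp [hr, hne]
      · rw [if_neg hc, ih (d.insert (pvKeyB r) r)]
        rw [PySem.Dict.get?_insert]
        by_cases he : pref = pvKeyB r
        · have hd : d.get? (pvKeyB r) = none := by
            rw [PySem.Dict.contains_eq_isSome_get?] at hc
            cases h : d.get? (pvKeyB r) <;> simp [h] at hc ⊢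
          simp [he, hd, hr]
        · have : pvKeyB r ≠ pref := fun h => he h.symm
          simp [he, hr, this]
        
-- main loop equivalence, for any preference list avoiding "None"
theorem pvLoop_eq (rs : List (List (String × String))) (prefs : List String)
    (h : ∀ p ∈ prefs, p ≠ "None") :
    pvALoop rs prefs
    = match pvBLoop (pvIndexB rs) prefs with
      | some v => some v
      | none => match rs with | [] => none | r :: _ => some r := by
  induction prefs with
  | nil => simp [pvALoop, pvBLoop]
  | cons pref rest ih =>
    have hpref : pref ≠ "None" := h pref (by simp)
    have hpred : (fun r => pvNormA (pvStrGetA r) == pref)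
        = (fun r : List (String × String) => !r.isEmpty && pvKeyB r == pref) := by
      funext r
      cases r with
      | nil =>
        have : pvNormA (pvStrGetA []) = "None" := by decide
        simp [this, Ne.symm hpref]
      | cons p ps => simp [pvKey_eq]
    have hget : (pvIndexB rs).get? pref
        = rs.find? (fun r => !r.isEmpty && pvKeyB r == pref) := by
      rw [pvIndexB, pvIndex_get rs PySem.Dict.empty pref]
      simp [PySem.Dict.get?_empty]
    rw [pvALoop, pvBLoop, hget, hpred]
    cases hf : rs.find? (fun r : List (String × String) => !r.isEmpty && pvKeyB r == pref) with
    | none => exact ih (fun p hp => h p (by simp [hp]))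
    | some m =>
      have := List.find?_some hf
      have hm : m.isEmpty = false := by
        cases hmi : m.isEmpty <;> simp_all
      simp [hm]

-- ===== VERDICT (by name: the statement is the Claim_ definition above) =====
theorem prioritize_prop_spec : Claim_equal_prioritize_prop := by
  intro rs _
  unfold Spec_prioritize_prop prioritize_prop prioritize_prop_alt
  rw [pvLoop_eq rs pvOrderA (by decide)]
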